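-- pv_equiv track=rewrite | github.com/onrmdc/pergen | backend/inventory/normalize_inventory.py | _role_from_hostname
-- ===== SOURCE A (Python) =====
-- def _parts(h: str):
--     return [p.strip() for p in (h or "").split("-") if p.strip()]
--
-- def _role_from_hostname(hostname: str) -> str:
--     h = (hostname or "").upper()
--     p = _parts(hostname)
--     if any(s == "DCFW" for s in p) or h.startswith("DCFW"):
--         return "Firewall"
--     if h.startswith("WANEDGESW") or h.startswith("WANEDGE"):
--         return "Wan-Edge"
--     if h.startswith("BGSW"):
--         return "Border-Gateway"
--     if h.startswith("BLSW"):
--         return "Border-Leaf"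
--     if h.startswith("SSW") or (h.startswith("S") and not h.startswith("BL") and not h.startswith("BG")):
--         return "Spine"
--     if h.startswith("LSW") or "LSW" in p:
--         return "Leaf"
--     return ""
-- ===== SOURCE B (Python) =====
-- _RULES = [
--     ("Firewall", "DCFW", "DCFW"),
--     ("Wan-Edge", "WANEDGE", None),
--     ("Border-Gateway", "BGSW", None),
--     ("Border-Leaf", "BLSW", None),
--     ("Spine", "S", None),
--     ("Leaf", "LSW", "LSW"),
-- ]
--
-- def _role_from_hostname(hostname: str) -> str:
--     h = (hostname or "").upper()
--     tokens = [p.strip() for p in (hostname or "").split("-") if p.strip()]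
--     for role, prefix, token in _RULES:
--         if h.startswith(prefix) or (token is not None and token in tokens):
--             return role
--     return ""
-- ===== Notes on version B (the rewrite author's own statement) =====
-- stated objective: simpler
-- what changed: Replaced the hard-coded if/elif chain by a data-driven scan over a static ordered rule table (role, prefix, optional part-token), merging the redundant WANEDGESW check into the WANEDGE prefix and simplifying the Spine predicate to the bare S-prefix test since the BL/BG exclusions are vacuous there.
import Mathlib
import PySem

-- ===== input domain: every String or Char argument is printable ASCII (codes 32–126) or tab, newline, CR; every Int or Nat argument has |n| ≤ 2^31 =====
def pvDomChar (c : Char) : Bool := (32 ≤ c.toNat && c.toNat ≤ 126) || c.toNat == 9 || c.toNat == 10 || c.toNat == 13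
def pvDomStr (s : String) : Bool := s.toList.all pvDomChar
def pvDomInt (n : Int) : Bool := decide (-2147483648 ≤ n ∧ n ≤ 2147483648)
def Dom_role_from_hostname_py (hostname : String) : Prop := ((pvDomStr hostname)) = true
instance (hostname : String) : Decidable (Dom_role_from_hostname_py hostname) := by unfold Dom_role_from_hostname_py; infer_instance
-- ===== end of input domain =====

-- B replaces A's if/elif chain by a data-driven first-matching-rule scan over a static rule table (objective: simpler/alternative decomposition).

-- ===== PORT A =====
-- _parts(h) = [p.strip() for p in (h or "").split("-") if p.strip()]
def pv_parts (h : String) : List String :=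
  ((((PySem.Str.split? h "-").getD []).map PySem.Str.strip).filter (fun q => q ≠ ""))

def role_from_hostname_py (hostname : String) : String :=
  let h := PySem.Str.upper hostname
  let p := pv_parts hostname
  if p.any (fun s => s == "DCFW") || PySem.Str.startswith h "DCFW" then "Firewall"
  else if PySem.Str.startswith h "WANEDGESW" || PySem.Str.startswith h "WANEDGE" then "Wan-Edge"
  else if PySem.Str.startswith h "BGSW" then "Border-Gateway"
  else if PySem.Str.startswith h "BLSW" then "Border-Leaf"
  else if PySem.Str.startswith h "SSW" ||
          (PySem.Str.startswith h "S" && !PySem.Str.startswith h "BL" && !PySem.Str.startswith h "BG") then "Spine"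
  else if PySem.Str.startswith h "LSW" || p.contains "LSW" then "Leaf"
  else ""

-- ===== PORT B =====
def pvRules : List (String × String × Option String) :=
  [("Firewall", "DCFW", some "DCFW"),
   ("Wan-Edge", "WANEDGE", none),
   ("Border-Gateway", "BGSW", none),
   ("Border-Leaf", "BLSW", none),
   ("Spine", "S", none),
   ("Leaf", "LSW", some "LSW")]

-- the for-loop over _RULES with early return
def pvFirstRule (h : String) (tokens : List String) : List (String × String × Option String) → String
  | [] => ""
  | (role, pre, tok) :: rest =>
    if PySem.Str.startswith h pre || (match tok with | some t => tokens.contains t | none => false)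
    then role
    else pvFirstRule h tokens rest

def role_from_hostname_py_alt (hostname : String) : String :=
  let h := PySem.Str.upper hostname
  let tokens := ((((PySem.Str.split? hostname "-").getD []).map PySem.Str.strip).filter (fun q => q ≠ ""))
  pvFirstRule h tokens pvRules

-- ===== PRECONDITION & SPEC =====
def Spec_role_from_hostname_py (hostname : String) (out : String) : Prop := out = role_from_hostname_py_alt hostname
instance (hostname : String) (out : String) : Decidable (Spec_role_from_hostname_py hostname out) := by unfold Spec_role_from_hostname_py; infer_instance

-- ===== CLAIM (what is proved, stated in full; the proofs are below) =====
def Claim_equal_role_from_hostname_py : Prop := ∀ (hostname : String), Dom_role_from_hostname_py hostname → Spec_role_from_hostname_py hostname (role_from_hostname_py hostname)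

-- ===== LEMMAS AND PROOFS =====

theorem pv_any_eq_contains (xs : List String) (a : String) :
    xs.any (fun s => s == a) = xs.contains a := by
  rw [Bool.eq_iff_iff, List.any_eq_true, List.contains_iff_exists_mem_beq]
  constructor
  · rintro ⟨x, hx, hb⟩; exact ⟨x, hx, by rw [beq_iff_eq] at hb ⊢; exact hb.symm⟩
  · rintro ⟨x, hx, hb⟩; exact ⟨x, hx, by rw [beq_iff_eq] at hb ⊢; exact hb.symm⟩

theorem pv_sw_mono (h : String) (p q : String) (hpq : q.toList <+: p.toList)
    (hp : PySem.Str.startswith h p = true) : PySem.Str.startswith h q = true := by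
  simp only [PySem.Str.startswith_eq, PySem.Chars.startswith_iff] at *
  exact hpq.trans hp

theorem pv_sw_S_not_B (h : String) (q : String) (t : List Char)
    (hq : q.toList = 'B' :: t)
    (hS : PySem.Str.startswith h "S" = true) :
    PySem.Str.startswith h q = false := by
  simp only [PySem.Str.startswith_eq, PySem.Chars.startswith_iff] at *
  by_contra hb
  rw [Bool.not_eq_false, PySem.Chars.startswith_iff] at hb
  obtain ⟨u, hu⟩ := hS
  obtain ⟨v, hv⟩ := hb
  rw [hq] at hv
  rw [← hv] at hu
  have hSl : "S".toList = ['S'] := by decide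
  rw [hSl] at hu
  simp at hu

theorem pv_spine_eq (h : String) :
    (PySem.Str.startswith h "SSW" ||
      (PySem.Str.startswith h "S" && !PySem.Str.startswith h "BL" && !PySem.Str.startswith h "BG")) =
    PySem.Str.startswith h "S" := by
  by_cases hS : PySem.Str.startswith h "S" = true
  · rw [hS, pv_sw_S_not_B h "BL" ['L'] (by decide) hS, pv_sw_S_not_B h "BG" ['G'] (by decide) hS]
    simp
  · have hS' : PySem.Str.startswith h "S" = false := by simpa using hS
    have hSSW : PySem.Str.startswith h "SSW" = false := by
      by_contra hx
      rw [Bool.not_eq_false] at hx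
      rw [pv_sw_mono h "SSW" "S" (by decide) hx] at hS'
      cases hS'
    rw [hS', hSSW]
    simp

theorem pv_wan_eq (h : String) :
    (PySem.Str.startswith h "WANEDGESW" || PySem.Str.startswith h "WANEDGE") =
    PySem.Str.startswith h "WANEDGE" := by
  by_cases hx : PySem.Str.startswith h "WANEDGESW" = true
  · rw [hx, pv_sw_mono h "WANEDGESW" "WANEDGE" (by decide) hx]; rfl
  · have : PySem.Str.startswith h "WANEDGESW" = false := by simpa using hx
    rw [this]; simp

-- ===== VERDICT (by name: the statement is the Claim_ definition above) =====
theorem role_from_hostname_py_spec : Claim_equal_role_from_hostname_py := by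
  intro hostname _
  unfold Spec_role_from_hostname_py role_from_hostname_py role_from_hostname_py_alt
  simp only [pvFirstRule, pvRules, pv_parts]
  simp only [pv_any_eq_contains, pv_wan_eq, pv_spine_eq, Bool.or_false]
  simp only [Bool.or_comm]
  rfl
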